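-- pv_equiv track=rewrite | github.com/salocinrevenge/ProgCompetitiva | soltos/primos/i.py | calcular_quantos_primos_ja_foi
-- ===== SOURCE A (Python) =====
-- def calcular_quantos_primos_ja_foi(sweetness, primes):
--     primos_ate_aqui = [0]
--     atual = 0
--     for i in range(len(sweetness)):
--         # b_is_prime = is_prime_on_this_list(primes, sweetness[i]) # talvez usar set e in? ou calcular primo na moral?
--         # if b_is_prime != None:
--         if sweetness[i] in primes:
--             atual += 1
--         primos_ate_aqui.append(atual)
--     return primos_ate_aqui
-- ===== SOURCE B (Python) =====
-- def calcular_quantos_primos_ja_foi(sweetness, primes):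
--     # run-length construction: hash the primes once, locate the hit positions,
--     # then emit the answer as constant runs between consecutive hits
--     prime_set = set(primes)
--     n = len(sweetness)
--     hit_positions = [i for i, x in enumerate(sweetness) if x in prime_set]
--     out = []
--     prev = 0
--     for k, p in enumerate(hit_positions):
--         out += [k] * (p + 1 - prev)
--         prev = p + 1
--     out += [len(hit_positions)] * (n + 1 - prev)
--     return out
-- ===== Notes on version B (the rewrite author's own statement) =====
-- stated objective: alternative
-- what changed: Replaces A's per-element loop with a running counter (and a list scan of primes per element) by a run-length construction: primes are hashed into a set once, the positions of prime hits are collected, and the output is emitted as constant runs between consecutive hit positions.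
import Mathlib
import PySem

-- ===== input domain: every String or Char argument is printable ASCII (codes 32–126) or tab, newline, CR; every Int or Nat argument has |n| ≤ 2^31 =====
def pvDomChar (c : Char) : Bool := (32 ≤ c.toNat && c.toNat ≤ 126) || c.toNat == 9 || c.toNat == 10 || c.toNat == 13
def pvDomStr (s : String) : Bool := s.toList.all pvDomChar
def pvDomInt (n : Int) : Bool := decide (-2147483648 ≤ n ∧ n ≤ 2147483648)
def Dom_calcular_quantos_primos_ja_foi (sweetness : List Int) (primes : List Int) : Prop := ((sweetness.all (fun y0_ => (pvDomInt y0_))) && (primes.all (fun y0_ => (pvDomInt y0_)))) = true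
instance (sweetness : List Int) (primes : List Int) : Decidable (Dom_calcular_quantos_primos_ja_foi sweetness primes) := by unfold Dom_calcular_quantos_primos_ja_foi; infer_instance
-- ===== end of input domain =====

-- B replaces A's per-element counter loop by a run-length construction: it hashes the
-- primes into a set, collects the hit positions, and emits the answer as constant runs.

-- ===== PORT A =====
-- for i in range(len(sweetness)): if sweetness[i] in primes: atual += 1; primos_ate_aqui.append(atual)
def calcular_quantos_primos_ja_foi (sweetness : List Int) (primes : List Int) : List Int :=
  (PySem.List.pyRange 0 (sweetness.length : Int) 1).foldl
    (fun acc i =>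
      let atual := if PySem.List.pyGetD sweetness i 0 ∈ primes then acc.2 + 1 else acc.2
      (acc.1 ++ [atual], atual))
    (([0] : List Int), (0 : Int)) |>.1

-- ===== PORT B =====
-- prime_set = set(primes); hit_positions = [i for i, x in enumerate(sweetness) if x in prime_set]
-- for k, p in enumerate(hit_positions): out += [k] * (p + 1 - prev); prev = p + 1
-- out += [len(hit_positions)] * (n + 1 - prev)
def calcular_quantos_primos_ja_foi_alt (sweetness : List Int) (primes : List Int) : List Int :=
  let prime_set := PySem.Set.ofList primes
  let n := (sweetness.length : Int)
  let hit_positions :=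
    ((PySem.List.enumerate sweetness 0).filter
      (fun ix => PySem.Set.contains prime_set ix.2)).map (fun ix => ix.1)
  let st := (PySem.List.enumerate hit_positions 0).foldl
    (fun acc kp => (acc.1 ++ List.replicate (kp.2 + 1 - acc.2).toNat kp.1, kp.2 + 1))
    (([] : List Int), (0 : Int))
  st.1 ++ List.replicate (n + 1 - st.2).toNat ((hit_positions.length : Int))

-- ===== PRECONDITION & SPEC =====
def Spec_calcular_quantos_primos_ja_foi (sweetness : List Int) (primes : List Int) (out : List Int) : Prop := out = calcular_quantos_primos_ja_foi_alt sweetness primes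
instance (sweetness : List Int) (primes : List Int) (out : List Int) : Decidable (Spec_calcular_quantos_primos_ja_foi sweetness primes out) := by unfold Spec_calcular_quantos_primos_ja_foi; infer_instance

-- ===== CLAIM (what is proved, stated in full; the proofs are below) =====
def Claim_equal_calcular_quantos_primos_ja_foi : Prop := ∀ (sweetness : List Int) (primes : List Int), Dom_calcular_quantos_primos_ja_foi sweetness primes → Spec_calcular_quantos_primos_ja_foi sweetness primes (calcular_quantos_primos_ja_foi sweetness primes)

-- ===== LEMMAS AND PROOFS =====
-- canonical prefix-count list: pvGo primes xs c = [c, c+ind x0, c+ind x0+ind x1, …]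
def pvGo (primes : List Int) : List Int → Int → List Int
  | [], c => [c]
  | x :: xs, c => c :: pvGo primes xs (c + if x ∈ primes then 1 else 0)

-- positions (from offset o) of the elements of xs that are in primes
def pvHp (primes : List Int) : Int → List Int → List Int
  | _, [] => []
  | o, x :: xs => if x ∈ primes then o :: pvHp primes (o + 1) xs else pvHp primes (o + 1) xs

-- the run-emitting fold of B, as a structural recursion on the position list
def pvG : List Int → Int → Int → List Int → (List Int × Int)
  | [], _, prev, out => (out, prev)
  | p :: ps, k, prev, out => pvG ps (k + 1) (p + 1) (out ++ List.replicate (p + 1 - prev).toNat k)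

-- B's full result from state (k, prev, out) with final index top
def pvH (ps : List Int) (k prev : Int) (out : List Int) (top : Int) : List Int :=
  (pvG ps k prev out).1 ++
    List.replicate (top + 1 - (pvG ps k prev out).2).toNat (k + (ps.length : Int))

lemma pv_auxA (primes : List Int) (xs : List Int) (l : List Int) (a : Int) :
    (xs.foldl
      (fun acc x =>
        let atual := if x ∈ primes then acc.2 + 1 else acc.2
        (acc.1 ++ [atual], atual))
      (l ++ [a], a)).1 = l ++ pvGo primes xs a := by
  induction xs generalizing l a with
  | nil => simp [pvGo]
  | cons x xs ih =>
    simp only [List.foldl_cons, pvGo]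
    by_cases hx : x ∈ primes <;>
      simpa [hx] using ih (l ++ [a]) (if x ∈ primes then a + 1 else a)

lemma pv_hp_eq' (primes : List Int) (xs : List Int) (o : Int) :
    ((PySem.List.enumerate xs o).filter
      (fun ix => decide (ix.2 ∈ primes))).map (fun ix => ix.1)
    = pvHp primes o xs := by
  induction xs generalizing o with
  | nil => simp [pvHp, PySem.List.enumerate_nil]
  | cons x xs ih =>
    rw [PySem.List.enumerate_cons, List.filter_cons]
    by_cases hx : x ∈ primes <;> simp [pvHp, hx, ih]

lemma pv_hp_eq (primes : List Int) (xs : List Int) (o : Int) :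
    ((PySem.List.enumerate xs o).filter
      (fun ix => PySem.Set.contains (PySem.Set.ofList primes) ix.2)).map (fun ix => ix.1)
    = pvHp primes o xs := by
  rw [show (fun ix : Int × Int => PySem.Set.contains (PySem.Set.ofList primes) ix.2)
      = (fun ix : Int × Int => decide (ix.2 ∈ primes)) from by
    funext ix
    simp [PySem.Set.mem_ofList]]
  exact pv_hp_eq' primes xs o

lemma pv_hp_ge (primes : List Int) :
    ∀ (xs : List Int) (o : Int), ∀ q ∈ pvHp primes o xs, o ≤ q := by
  intro xs
  induction xs with
  | nil => intro o q hq; simp [pvHp] at hq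
  | cons x xs ih =>
    intro o q hq
    by_cases hx : x ∈ primes
    · simp only [pvHp, hx, if_true, List.mem_cons] at hq
      rcases hq with h | h
      · omega
      · have := ih (o + 1) q h; omega
    · simp only [pvHp, hx, if_false] at hq
      have := ih (o + 1) q hq; omega

lemma pv_foldG : ∀ (ps : List Int) (k prev : Int) (out : List Int),
    (PySem.List.enumerate ps k).foldl
      (fun acc kp => (acc.1 ++ List.replicate (kp.2 + 1 - acc.2).toNat kp.1, kp.2 + 1))
      (out, prev) = pvG ps k prev out := by
  intro ps
  induction ps with
  | nil => intro k prev out; simp [pvG, PySem.List.enumerate_nil]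
  | cons p ps ih =>
    intro k prev out
    rw [PySem.List.enumerate_cons, List.foldl_cons]
    exact ih (k + 1) (p + 1) (out ++ List.replicate (p + 1 - prev).toNat k)

lemma pv_shift (ps : List Int) (k prev : Int) (out : List Int) (top : Int)
    (hps : ∀ q ∈ ps, prev + 1 ≤ q) (htop : prev ≤ top) :
    pvH ps k prev out top = pvH ps k (prev + 1) (out ++ [k]) top := by
  cases ps with
  | nil =>
    simp only [pvH, pvG]
    have h1 : (top + 1 - prev).toNat = (top + 1 - (prev + 1)).toNat + 1 := by omega
    rw [h1, List.replicate_succ]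
    simp
  | cons p ps =>
    have hp : prev + 1 ≤ p := hps p (List.mem_cons_self ..)
    simp only [pvH, pvG]
    have h1 : (p + 1 - prev).toNat = (p + 1 - (prev + 1)).toNat + 1 := by omega
    rw [h1, List.replicate_succ]
    simp

lemma pv_main (primes : List Int) :
    ∀ (xs : List Int) (k prev : Int) (out : List Int),
      pvH (pvHp primes prev xs) k prev out (prev + (xs.length : Int))
        = out ++ pvGo primes xs k := by
  intro xs
  induction xs with
  | nil =>
    intro k prev out
    simp only [pvHp, pvH, pvG, pvGo, List.length_nil]
    have h1 : (prev + (0 : Nat) + 1 - prev).toNat = 1 := by omega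
    rw [h1]
    simp
  | cons x xs ih =>
    intro k prev out
    by_cases hx : x ∈ primes
    · simp only [pvHp, hx, if_true, pvH, pvG]
      have h1 : (prev + 1 - prev).toNat = 1 := by omega
      have htop : prev + (((x :: xs).length : Nat) : Int) = (prev + 1) + (xs.length : Int) := by
        simp; omega
      rw [h1, htop]
      have hval : k + (((pvHp primes (prev + 1) xs).length + 1 : Nat) : Int)
          = (k + 1) + ((pvHp primes (prev + 1) xs).length : Int) := by push_cast; ring
      have := ih (k + 1) (prev + 1) (out ++ [k])
      simp only [pvH] at this
      simp only [List.length_cons, hval, this, List.replicate_one]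
      simp [pvGo, hx]
    · have hrw : pvHp primes prev (x :: xs) = pvHp primes (prev + 1) xs := by
        simp [pvHp, hx]
      have htop : prev + (((x :: xs).length : Nat) : Int) = (prev + 1) + (xs.length : Int) := by
        simp; omega
      rw [hrw, htop]
      have hge : ∀ q ∈ pvHp primes (prev + 1) xs, prev + 1 ≤ q := pv_hp_ge primes xs (prev + 1)
      have hle : prev ≤ (prev + 1) + (xs.length : Int) := by
        have : (0 : Int) ≤ (xs.length : Int) := Int.natCast_nonneg _
        omega
      rw [pv_shift _ k prev out _ hge hle, ih k (prev + 1) (out ++ [k])]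
      simp [pvGo, hx]

-- ===== VERDICT (by name: the statement is the Claim_ definition above) =====
theorem calcular_quantos_primos_ja_foi_spec : Claim_equal_calcular_quantos_primos_ja_foi := by
  intro sweetness primes _
  unfold Spec_calcular_quantos_primos_ja_foi calcular_quantos_primos_ja_foi calcular_quantos_primos_ja_foi_alt
  rw [PySem.List.foldl_pyRange_zero_pyGetD' sweetness 0
    (fun acc x =>
      let atual := if x ∈ primes then acc.2 + 1 else acc.2
      (acc.1 ++ [atual], atual)) (([0] : List Int), (0 : Int))]
  have hA := pv_auxA primes sweetness [] 0
  simp only [List.nil_append] at hA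
  rw [hA]
  simp only [pv_hp_eq primes sweetness 0, pv_foldG]
  have := pv_main primes sweetness 0 0 []
  simp only [pvH, zero_add, List.nil_append] at this
  exact this.symm
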